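-- pv_equiv track=rewrite | github.com/Mike-50505/AG_mejorado | Proyectofinal.py | validar_poblacion_sin_gaps
-- ===== SOURCE A (Python) =====
-- def validar_poblacion_sin_gaps(poblacion, originales):
--     for individuo in poblacion:
--         for seq, seq_orig in zip(individuo, originales):
--             seq_sin_gaps = [a for a in seq if a != '-']
--             seq_orig_sin_gaps = [a for a in seq_orig if a != '-']
--             if seq_sin_gaps != seq_orig_sin_gaps:
--                 return False
--     return True
-- ===== SOURCE B (Python) =====
-- def validar_poblacion_sin_gaps(poblacion, originales):
--     def igual_sin_gaps(seq, orig):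
--         # two-pointer lockstep comparison skipping '-' on both sides;
--         # no intermediate stripped lists are built
--         i, j, n, m = 0, 0, len(seq), len(orig)
--         while True:
--             while i < n and seq[i] == '-':
--                 i += 1
--             while j < m and orig[j] == '-':
--                 j += 1
--             if i == n or j == m:
--                 return i == n and j == m
--             if seq[i] != orig[j]:
--                 return False
--             i += 1
--             j += 1
--     for individuo in poblacion:
--         for seq, seq_orig in zip(individuo, originales):
--             if not igual_sin_gaps(seq, seq_orig):
--                 return False
--     return True
-- ===== Notes on version B (the rewrite author's own statement) =====
-- stated objective: alternative
-- what changed: Replaces building and comparing gap-stripped list copies with an in-place two-pointer lockstep scan that skips '-' on both sequences and compares residues directly, allocating nothing per pair.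
import Mathlib
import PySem

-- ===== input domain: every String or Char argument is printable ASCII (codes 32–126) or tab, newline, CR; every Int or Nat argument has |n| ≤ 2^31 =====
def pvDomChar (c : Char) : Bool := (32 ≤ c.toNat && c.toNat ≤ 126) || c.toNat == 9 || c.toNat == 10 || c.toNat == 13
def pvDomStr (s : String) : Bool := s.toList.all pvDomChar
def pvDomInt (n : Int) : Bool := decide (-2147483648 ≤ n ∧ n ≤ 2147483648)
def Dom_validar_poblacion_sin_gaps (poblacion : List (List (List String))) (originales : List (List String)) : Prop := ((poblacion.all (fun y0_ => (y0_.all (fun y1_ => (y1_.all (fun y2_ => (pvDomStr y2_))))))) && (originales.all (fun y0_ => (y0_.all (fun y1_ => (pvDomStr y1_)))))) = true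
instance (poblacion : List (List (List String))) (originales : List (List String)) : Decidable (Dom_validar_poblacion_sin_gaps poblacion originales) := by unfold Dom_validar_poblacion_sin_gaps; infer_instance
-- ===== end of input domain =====

-- B compares each pair with a two-pointer lockstep scan that skips '-' on both sides, instead of building gap-stripped list copies; objective: alternative.
-- ===== PORT A =====
-- inner 'for seq, seq_orig in zip(...)': False on first mismatch of gap-stripped lists
def pvA_inner : List (List String × List String) → Bool
  | [] => true
  | (seq, seq_orig) :: rest =>
    let seq_sin_gaps := seq.filter (fun a => a != "-")
    let seq_orig_sin_gaps := seq_orig.filter (fun a => a != "-")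
    if seq_sin_gaps ≠ seq_orig_sin_gaps then false else pvA_inner rest

def validar_poblacion_sin_gaps (poblacion : List (List (List String))) (originales : List (List String)) : Bool :=
  match poblacion with
  | [] => true
  | individuo :: rest =>
    if pvA_inner (individuo.zip originales) then validar_poblacion_sin_gaps rest originales
    else false

-- ===== PORT B =====
-- 'igual_sin_gaps': the two index cursors of Source B become the two list suffixes they point at
def pvB_eq : List String → List String → Bool
  | [], [] => true
  | [], y :: ys => if y == "-" then pvB_eq [] ys else false
  | x :: xs, [] => if x == "-" then pvB_eq xs [] else false
  | x :: xs, y :: ys =>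
    if x == "-" then pvB_eq xs (y :: ys)
    else if y == "-" then pvB_eq (x :: xs) ys
    else x == y && pvB_eq xs ys
  termination_by xs ys => xs.length + ys.length

def pvB_inner : List (List String × List String) → Bool
  | [] => true
  | (seq, seq_orig) :: rest =>
    if ¬ pvB_eq seq seq_orig then false else pvB_inner rest

def validar_poblacion_sin_gaps_alt (poblacion : List (List (List String))) (originales : List (List String)) : Bool :=
  match poblacion with
  | [] => true
  | individuo :: rest =>
    if pvB_inner (individuo.zip originales) then validar_poblacion_sin_gaps_alt rest originales
    else false

-- ===== PRECONDITION & SPEC =====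
def Spec_validar_poblacion_sin_gaps (poblacion : List (List (List String))) (originales : List (List String)) (out : Bool) : Prop := out = validar_poblacion_sin_gaps_alt poblacion originales
instance (poblacion : List (List (List String))) (originales : List (List String)) (out : Bool) : Decidable (Spec_validar_poblacion_sin_gaps poblacion originales out) := by unfold Spec_validar_poblacion_sin_gaps; infer_instance

-- ===== CLAIM (what is proved, stated in full; the proofs are below) =====
def Claim_equal_validar_poblacion_sin_gaps : Prop := ∀ (poblacion : List (List (List String))) (originales : List (List String)), Dom_validar_poblacion_sin_gaps poblacion originales → Spec_validar_poblacion_sin_gaps poblacion originales (validar_poblacion_sin_gaps poblacion originales)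

-- ===== LEMMAS AND PROOFS =====
lemma pvB_eq_nil (ys : List String) :
    pvB_eq [] ys = (([] : List String) == ys.filter (fun a => a != "-")) := by
  induction ys with
  | nil => simp [pvB_eq]
  | cons y ys ih =>
    by_cases h : y = "-" <;> simp [pvB_eq, h, ih]

lemma pvB_eq_filter (xs ys : List String) :
    pvB_eq xs ys = (xs.filter (fun a => a != "-") == ys.filter (fun a => a != "-")) := by
  induction xs generalizing ys with
  | nil => simpa using pvB_eq_nil ys
  | cons x xs ihx =>
    induction ys with
    | nil =>
      by_cases h : x = "-" <;>
        simp [pvB_eq, h, ihx []]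
    | cons y ys ihy =>
      by_cases hx : x = "-"
      · simp [pvB_eq, List.filter_cons, hx, ihx (y :: ys)]
      · by_cases hy : y = "-"
        · simpa [pvB_eq, List.filter_cons, hx, hy] using ihy
        · by_cases hxy : x = y <;>
            simp [pvB_eq, hx, hy, hxy, ihx ys]

lemma pvInner_eq (l : List (List String × List String)) : pvA_inner l = pvB_inner l := by
  induction l with
  | nil => rfl
  | cons p rest ih =>
    obtain ⟨s, o⟩ := p
    simp only [pvA_inner, pvB_inner, pvB_eq_filter]
    by_cases h : s.filter (fun a => a != "-") = o.filter (fun a => a != "-") <;> simp [h, ih]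

-- ===== VERDICT (by name: the statement is the Claim_ definition above) =====
lemma pvAB (poblacion : List (List (List String))) (originales : List (List String)) :
    validar_poblacion_sin_gaps poblacion originales = validar_poblacion_sin_gaps_alt poblacion originales := by
  induction poblacion with
  | nil => rfl
  | cons ind rest ih =>
    simp only [validar_poblacion_sin_gaps, validar_poblacion_sin_gaps_alt, pvInner_eq, ih]

theorem validar_poblacion_sin_gaps_spec : Claim_equal_validar_poblacion_sin_gaps :=
  fun poblacion originales _ => pvAB poblacion originales
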